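-- pv_equiv track=rewrite | github.com/nick-killeen/PLE | PLE/Source/Relation/Relation.py | _areNumbersLegal
-- ===== SOURCE A (Python) =====
-- def _areNumbersLegal(dataString):
--     # compile a list of all numbers
--     involvedNumbers = [""];
--     currentNumber = 0;
--     for character in dataString:
--         if ("0123456789".count(character) != 0):
--             involvedNumbers[currentNumber] += character;
--         elif involvedNumbers[currentNumber] != "":
--             involvedNumbers.append("");
--             currentNumber += 1;
--
--     # check that each number has no leading zeros if it is more than
--     # one digit long
--     hasFoundIllegalNum = False;
--     for number in involvedNumbers:
--         if (len(number) > 1):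
--             if (number[0] == '0'):
--                 hasFoundIllegalNum = True;
--
--     return not hasFoundIllegalNum;
-- ===== SOURCE B (Python) =====
-- def _areNumbersLegal(dataString):
--     # Single forward pass: a number is illegal exactly when a '0' starts a
--     # digit run (start of string or preceded by a non-digit) and is
--     # immediately followed by another digit.  Early-return on the first one.
--     prev_is_digit = False
--     for i, c in enumerate(dataString):
--         if (c == '0' and not prev_is_digit
--                 and i + 1 < len(dataString)
--                 and dataString[i + 1] in "0123456789"):
--             return False
--         prev_is_digit = c in "0123456789"
--     return True
-- ===== Notes on version B (the rewrite author's own statement) =====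
-- stated objective: simpler
-- what changed: Replaces A's two-pass scheme (build a list of all maximal digit runs, then scan that list for a multi-digit run with a leading zero) by a single forward scan that returns False as soon as a zero opening a digit run is immediately followed by another digit.
import Mathlib
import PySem

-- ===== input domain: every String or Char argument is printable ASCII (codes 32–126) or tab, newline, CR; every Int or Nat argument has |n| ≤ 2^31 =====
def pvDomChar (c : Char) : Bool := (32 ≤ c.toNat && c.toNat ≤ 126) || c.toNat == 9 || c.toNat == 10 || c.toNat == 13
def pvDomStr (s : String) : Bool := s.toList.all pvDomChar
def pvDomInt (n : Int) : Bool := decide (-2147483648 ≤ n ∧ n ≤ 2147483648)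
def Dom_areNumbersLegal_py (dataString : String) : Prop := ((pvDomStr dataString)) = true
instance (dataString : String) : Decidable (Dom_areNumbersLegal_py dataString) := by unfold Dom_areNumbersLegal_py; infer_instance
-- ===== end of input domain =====

-- B replaces A's two passes (collect all maximal digit runs, then scan them for a
-- multi-digit run starting with '0') by one forward scan that stops at the first
-- '0' opening a digit run that is followed by another digit; objective: simpler.

-- ===== PORT A =====
-- Python strings being concatenated character by character are kept as List Char.
def pvStepA (st : List (List Char) × Nat) (c : Char) : List (List Char) × Nat :=
  let inv := st.1
  let cur := st.2
  if ("0123456789".toList.count c ≠ 0) then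
    (inv.set cur (inv.getD cur [] ++ [c]), cur)
  else if inv.getD cur [] ≠ [] then
    (inv ++ [[]], cur + 1)
  else
    (inv, cur)

def areNumbersLegal_py (dataString : String) : Bool :=
  let fin := dataString.toList.foldl pvStepA ([[]], 0)
  let hasFoundIllegalNum :=
    fin.1.foldl (fun h n =>
      if n.length > 1 then
        (if PySem.List.pyGet? n 0 = some '0' then true else h)
      else h) false
  !hasFoundIllegalNum

-- ===== PORT B =====
def pvIsDig (c : Char) : Bool := "0123456789".toList.contains c

-- Source B's loop with early return; the i+1 lookahead is the head of the rest.
def pvAltGo : Bool → List Char → Bool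
  | _, [] => true
  | prev, c :: rest =>
    if c == '0' && !prev && (match rest with | d :: _ => pvIsDig d | [] => false) then
      false
    else
      pvAltGo (pvIsDig c) rest

def areNumbersLegal_py_alt (dataString : String) : Bool :=
  pvAltGo false dataString.toList

-- ===== PRECONDITION & SPEC =====
def Spec_areNumbersLegal_py (dataString : String) (out : Bool) : Prop := out = areNumbersLegal_py_alt dataString
instance (dataString : String) (out : Bool) : Decidable (Spec_areNumbersLegal_py dataString out) := by unfold Spec_areNumbersLegal_py; infer_instance

-- ===== CLAIM (what is proved, stated in full; the proofs are below) =====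
def Claim_equal_areNumbersLegal_py : Prop := ∀ (dataString : String), Dom_areNumbersLegal_py dataString → Spec_areNumbersLegal_py dataString (areNumbersLegal_py dataString)

-- ===== LEMMAS AND PROOFS =====

-- a run is illegal: more than one digit and starts with '0'
def pvBadNum (n : List Char) : Bool := decide (1 < n.length) && decide (n.head? = some '0')

-- A's remaining work, abstracted: current run r, remaining characters l
def pvContRun (r : List Char) : List Char → Bool
  | [] => pvBadNum r
  | c :: l => if pvIsDig c then pvContRun (r ++ [c]) l else (pvBadNum r || pvContRun [] l)

theorem pyGet0_eq_head? (n : List Char) : PySem.List.pyGet? n 0 = n.head? := by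
  cases n <;> simp [PySem.List.pyGet?, PySem.List.pyIdx?]

theorem badnum_eq (n : List Char) :
    (if n.length > 1 then (if PySem.List.pyGet? n 0 = some '0' then true else false) else false)
      = pvBadNum n := by
  simp only [pyGet0_eq_head?, pvBadNum]
  split_ifs <;> simp_all

-- A's second loop is an `any` over the runs
theorem loop2_any (xs : List (List Char)) (h : Bool) :
    xs.foldl (fun h n =>
      if n.length > 1 then (if PySem.List.pyGet? n 0 = some '0' then true else h) else h) h
      = (h || xs.any pvBadNum) := by
  induction xs generalizing h with
  | nil => simp
  | cons n xs ih =>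
    simp only [List.foldl_cons, List.any_cons, ih]
    rw [← badnum_eq n]
    split_ifs <;> simp_all [Bool.or_comm]

theorem count_ne_iff_isDig (c : Char) :
    ("0123456789".toList.count c ≠ 0) ↔ pvIsDig c = true := by
  simp [pvIsDig, List.count_eq_zero]
  tauto

theorem getD_append_len (pre : List (List Char)) (r : List Char) :
    (pre ++ [r]).getD pre.length [] = r := by
  simp [List.getD]

theorem set_append_len (pre : List (List Char)) (r x : List Char) :
    (pre ++ [r]).set pre.length x = pre ++ [x] := by
  induction pre with
  | nil => simp
  | cons p pre ih => simp [ih]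

-- A's fold, related to pvContRun
theorem foldA_any (l : List Char) (pre : List (List Char)) (r : List Char) :
    (l.foldl pvStepA (pre ++ [r], pre.length)).1.any pvBadNum
      = (pre.any pvBadNum || pvContRun r l) := by
  induction l generalizing pre r with
  | nil => simp [pvContRun]
  | cons c l ih =>
    simp only [List.foldl_cons, pvStepA]
    by_cases hd : "0123456789".toList.count c ≠ 0
    · have hdig : pvIsDig c = true := (count_ne_iff_isDig c).1 hd
      simp only [if_pos hd, getD_append_len, set_append_len, ih]
      simp [pvContRun, hdig]
    · have hdig : pvIsDig c = false := by
        by_contra h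
        exact hd ((count_ne_iff_isDig c).2 (by simpa using h))
      simp only [if_neg hd, getD_append_len]
      by_cases hr : r ≠ []
      · rw [if_pos hr]
        have h2 := ih (pre ++ [r]) []
        simp only [List.length_append, List.length_singleton, List.append_assoc,
          List.cons_append, List.nil_append] at h2 ⊢
        rw [h2]
        simp [pvContRun, hdig, List.any_append, Bool.or_assoc]
      · rw [if_neg hr]
        rw [not_ne_iff] at hr
        subst hr
        simp [ih, pvContRun, hdig, pvBadNum]

-- a doomed run (starts '0', already multi-digit) stays illegal
theorem contRun_doomed (l : List Char) :
    ∀ r : List Char, r.head? = some '0' → 1 < r.length → pvContRun r l = true := by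
  induction l with
  | nil => intro r h1 h2; simp [pvContRun, pvBadNum, h1, h2]
  | cons c l ih =>
    intro r h1 h2
    simp only [pvContRun]
    by_cases hd : pvIsDig c = true
    · rw [if_pos hd]
      apply ih
      · cases r <;> simp_all
      · simp; omega
    · rw [if_neg hd]
      simp [pvBadNum, h1, h2]

theorem dig_zero : pvIsDig '0' = true := by decide

-- the core correspondence between A's run collection and B's lookahead scan
theorem contRun_altGo (l : List Char) :
    (pvContRun [] l = !(pvAltGo false l)) ∧
    (∀ r : List Char, r ≠ [] → r.head? ≠ some '0' → pvContRun r l = !(pvAltGo true l)) := by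
  induction l with
  | nil =>
    refine ⟨by simp [pvContRun, pvAltGo, pvBadNum], ?_⟩
    intro r hne h0
    simp only [pvContRun, pvAltGo, pvBadNum, Bool.not_true]
    cases r with
    | nil => simp at hne
    | cons a t => simp_all
  | cons c l ih =>
    obtain ⟨ih1, ih2⟩ := ih
    constructor
    · -- at the start of a run (prev = false)
      by_cases hd : pvIsDig c = true
      · by_cases h0 : c = '0'
        · subst h0
          cases l with
          | nil => decide
          | cons d l' =>
            by_cases hdd : pvIsDig d = true
            · have hdo := contRun_doomed l' ['0', d] rfl (by simp)
              simp [pvContRun, pvAltGo, dig_zero, hdd, hdo]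
            · have hd0 : ¬ d = '0' := fun h => hdd (h ▸ dig_zero)
              have ihs : pvContRun [] l' = !pvAltGo false l' := by
                simpa [pvContRun, pvAltGo, hdd, hd0, pvBadNum] using ih1
              simp [pvContRun, pvAltGo, dig_zero, hdd, pvBadNum, ihs]
        · have := ih2 [c] (by simp) (by simpa using h0)
          simp [pvContRun, pvAltGo, hd, h0, this]
      · have h0 : ¬ c = '0' := by rintro rfl; exact hd dig_zero
        simp [pvContRun, pvAltGo, hd, h0, pvBadNum, ih1]
    · -- inside a run whose head is not '0' (prev = true)
      intro r hne h0
      by_cases hd : pvIsDig c = true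
      · have := ih2 (r ++ [c]) (by simp) (by cases r <;> simp_all)
        simp [pvContRun, pvAltGo, hd, this]
      · have hb : pvBadNum r = false := by
          simp only [pvBadNum]
          cases r <;> simp_all
        simp [pvContRun, pvAltGo, hd, hb, ih1]

-- ===== VERDICT (by name: the statement is the Claim_ definition above) =====
theorem areNumbersLegal_py_spec : Claim_equal_areNumbersLegal_py := by
  intro s _
  unfold Spec_areNumbersLegal_py areNumbersLegal_py areNumbersLegal_py_alt
  simp only [loop2_any]
  have h := foldA_any s.toList [] []
  simp only [List.any_nil, List.length_nil, Bool.false_or, List.nil_append] at h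
  simp only [Bool.false_or, h, (contRun_altGo s.toList).1, Bool.not_not]
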